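-- pv_equiv track=rewrite | github.com/raeez/chiral-bar-cobar | compute/lib/theorem_wall_crossing_mc_engine.py | conifold_bps_spectrum
-- ===== SOURCE A (Python) =====
-- import math
-- from typing import Any, Dict, List, Optional, Sequence, Tuple
--
-- def is_primitive(g: Tuple[int, ...]) -> bool:
--     """Test if a charge vector is primitive (gcd of components = 1)."""
--     result = 0
--     for x in g:
--         result = math.gcd(result, abs(x))
--     return result == 1
--
-- def conifold_bps_spectrum(max_order: int) -> Dict[Tuple[int, ...], int]:
--     r"""The conifold BPS spectrum: Omega(gamma) = 1 for all primitive gamma.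
--
--     This is the Kontsevich-Soibelman / Reineke theorem for the resolved
--     conifold O(-1) + O(-1) -> P^1.
--
--     The spectrum is: Omega(a, b) = 1 if gcd(a, b) = 1 and a, b >= 0 and
--     (a, b) != (0, 0), restricted to the positive octant a > 0 or b > 0.
--     """
--     spectrum: Dict[Tuple[int, ...], int] = {}
--     for a in range(0, max_order + 1):
--         for b in range(0, max_order + 1):
--             if a == 0 and b == 0:
--                 continue
--             if is_primitive((a, b)):
--                 spectrum[(a, b)] = 1
--     return spectrum
-- ===== SOURCE B (Python) =====
-- def conifold_bps_spectrum(max_order):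
--     """Sieve: mark every pair (a, b) sharing a common divisor d >= 2, then
--     collect the unmarked pairs (other than (0, 0)) -- no gcd computations."""
--     size = max_order + 1
--     marked = [bytearray(size) for _ in range(size)]
--     for d in range(2, size):
--         for a in range(0, size, d):
--             row = marked[a]
--             for b in range(0, size, d):
--                 row[b] = 1
--     spectrum = {}
--     for a in range(size):
--         row = marked[a]
--         for b in range(size):
--             if (a or b) and not row[b]:
--                 spectrum[(a, b)] = 1
--     return spectrum
-- ===== Notes on version B (the rewrite author's own statement) =====
-- stated objective: alternative
-- what changed: B replaces A's per-pair gcd primitivity test with a divisor sieve: for each candidate divisor d it marks all pairs of multiples of d in a two-dimensional boolean table, then collects the unmarked pairs, so no gcd is ever computed.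
import Mathlib
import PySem

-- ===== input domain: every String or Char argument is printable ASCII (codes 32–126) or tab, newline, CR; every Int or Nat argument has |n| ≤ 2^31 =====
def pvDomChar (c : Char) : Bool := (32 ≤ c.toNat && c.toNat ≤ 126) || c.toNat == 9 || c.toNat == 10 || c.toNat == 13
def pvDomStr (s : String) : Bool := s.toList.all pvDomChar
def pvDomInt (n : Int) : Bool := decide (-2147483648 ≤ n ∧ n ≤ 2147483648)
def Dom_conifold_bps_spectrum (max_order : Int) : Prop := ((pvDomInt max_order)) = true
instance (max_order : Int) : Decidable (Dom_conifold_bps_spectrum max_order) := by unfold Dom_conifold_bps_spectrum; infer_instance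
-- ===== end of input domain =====

-- B replaces A's per-pair gcd test by a divisor sieve marking every pair with a common
-- divisor d ≥ 2 in a 2-D boolean table (objective: alternative algorithm, no gcd computed).

-- ===== PORT A =====
def is_primitive (g : List Int) : Bool :=
  (g.foldl (fun result x => ((Int.gcd result |x| : Nat) : Int)) 0) == 1

def conifold_bps_spectrum (max_order : Int) : List (List Int × Int) :=
  ((PySem.List.pyRange 0 (max_order + 1) 1).foldl (fun spectrum a =>
    (PySem.List.pyRange 0 (max_order + 1) 1).foldl (fun spectrum b =>
      if a = 0 ∧ b = 0 then spectrum
      else if is_primitive [a, b] then spectrum.insert [a, b] 1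
      else spectrum) spectrum)
    (PySem.Dict.empty)).items

-- ===== PORT B =====
-- 'for b in range(0, size, d): row[b] = 1'  (bytearray entries 0/1 used as flags → Bool)
def bps_mark_row (row : List Bool) (size d : Int) : List Bool :=
  (PySem.List.pyRange 0 size d).foldl (fun row b => PySem.List.pySetD row b true) row

-- 'for a in range(0, size, d): row = marked[a]; <mark row>'  (the Python mutates marked[a] in place)
def bps_sieve_step (marked : List (List Bool)) (size d : Int) : List (List Bool) :=
  (PySem.List.pyRange 0 size d).foldl (fun marked a =>
    PySem.List.pySetD marked a (bps_mark_row (PySem.List.pyGetD marked a []) size d)) marked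

def conifold_bps_spectrum_alt (max_order : Int) : List (List Int × Int) :=
  let size := max_order + 1
  -- '[bytearray(size) for _ in range(size)]': size zero-bytes per row (size ≥ 1 whenever a row is built)
  let marked0 : List (List Bool) :=
    (PySem.List.pyRange 0 size 1).map (fun _ => List.replicate size.toNat false)
  let marked := (PySem.List.pyRange 2 size 1).foldl (fun m d => bps_sieve_step m size d) marked0
  ((PySem.List.pyRange 0 size 1).foldl (fun spectrum a =>
    let row := PySem.List.pyGetD marked a []
    (PySem.List.pyRange 0 size 1).foldl (fun spectrum b =>
      if (¬ (a = 0 ∧ b = 0)) ∧ PySem.List.pyGetD row b false = false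
      then spectrum.insert [a, b] 1 else spectrum) spectrum)
    (PySem.Dict.empty)).items

-- ===== PRECONDITION & SPEC =====
def Spec_conifold_bps_spectrum (max_order : Int) (out : List (List Int × Int)) : Prop := out = conifold_bps_spectrum_alt max_order
instance (max_order : Int) (out : List (List Int × Int)) : Decidable (Spec_conifold_bps_spectrum max_order out) := by unfold Spec_conifold_bps_spectrum; infer_instance

-- ===== CLAIM (what is proved, stated in full; the proofs are below) =====
def Claim_equal_conifold_bps_spectrum : Prop := ∀ (max_order : Int), Dom_conifold_bps_spectrum max_order → Spec_conifold_bps_spectrum max_order (conifold_bps_spectrum max_order)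

-- ===== LEMMAS AND PROOFS =====

theorem pv_getD_set {α : Type} (xs : List α) (n m : Nat) (v d : α) :
    (xs.set n v).getD m d = if m = n ∧ n < xs.length then v else xs.getD m d := by
  simp only [List.getD_eq_getElem?_getD, List.getElem?_set]
  split_ifs with h1 h2 h3 h4 <;> simp_all

theorem pv_foldl_pySetD_length (L : List Int) (row : List Bool) :
    (L.foldl (fun r b => PySem.List.pySetD r b true) row).length = row.length := by
  induction L generalizing row with
  | nil => rfl
  | cons b L ih => simp [List.foldl_cons, ih, PySem.List.length_pySetD]

theorem pv_foldl_pySetD_getD (L : List Int) (hL : ∀ b ∈ L, 0 ≤ b) :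
    ∀ (row : List Bool) (j : Nat), j < row.length →
      (L.foldl (fun r b => PySem.List.pySetD r b true) row).getD j false
        = (row.getD j false || decide ((j : Int) ∈ L)) := by
  induction L with
  | nil => simp
  | cons b L ih =>
    intro row j hj
    have hb : 0 ≤ b := hL b (List.mem_cons_self ..)
    have hL' : ∀ b ∈ L, 0 ≤ b := fun x hx => hL x (List.mem_cons_of_mem _ hx)
    have hlen : (PySem.List.pySetD row b true).length = row.length :=
      PySem.List.length_pySetD ..
    rw [List.foldl_cons, ih hL' _ j (by rw [hlen]; exact hj)]
    rw [PySem.List.pySetD_of_nonneg _ _ hb, pv_getD_set]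
    by_cases hjb : (j : Int) = b
    · have h1 : j = b.toNat ∧ b.toNat < row.length := ⟨by omega, by omega⟩
      rw [if_pos h1]
      simp [List.mem_cons, hjb]
    · have h1 : ¬ (j = b.toNat ∧ b.toNat < row.length) := by
        rintro ⟨h, -⟩; omega
      rw [if_neg h1]
      simp [List.mem_cons, hjb]

theorem pv_range_nonneg {size d : Int} (hd : 0 < d) :
    ∀ b ∈ PySem.List.pyRange 0 size d, 0 ≤ b := by
  intro b hb
  rcases (PySem.List.mem_pyRange_iff_of_pos hd b).1 hb with ⟨h1, -, -⟩
  exact h1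

theorem pv_mark_row_length (row : List Bool) (size d : Int) :
    (bps_mark_row row size d).length = row.length :=
  pv_foldl_pySetD_length ..

theorem pv_mark_row_getD (row : List Bool) (size d : Int) (hd : 0 < d) (j : Nat)
    (hj : j < row.length) :
    (bps_mark_row row size d).getD j false
      = (row.getD j false || decide ((j : Int) ∈ PySem.List.pyRange 0 size d)) :=
  pv_foldl_pySetD_getD _ (pv_range_nonneg hd) row j hj

def pvCell (m : List (List Bool)) (i j : Nat) : Bool := (m.getD i []).getD j false

-- one sieve pass, as a fold over an arbitrary list of nonnegative row indices
theorem pv_rowfold_length (size d : Int) (L : List Int) (m : List (List Bool)) :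
    (L.foldl (fun m a =>
      PySem.List.pySetD m a (bps_mark_row (PySem.List.pyGetD m a []) size d)) m).length
      = m.length := by
  induction L generalizing m with
  | nil => rfl
  | cons a L ih => simp [List.foldl_cons, ih, PySem.List.length_pySetD]

theorem pv_rowfold_rows (size d : Int) (N : Nat) (L : List Int) (hL : ∀ a ∈ L, 0 ≤ a) :
    ∀ (m : List (List Bool)), (∀ k, k < m.length → (m.getD k []).length = N) →
      ∀ k, k < (L.foldl (fun m a =>
        PySem.List.pySetD m a (bps_mark_row (PySem.List.pyGetD m a []) size d)) m).length →
      ((L.foldl (fun m a =>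
        PySem.List.pySetD m a (bps_mark_row (PySem.List.pyGetD m a []) size d)) m).getD k []).length = N := by
  induction L with
  | nil => intro m hm; exact hm
  | cons a L ih =>
    intro m hm
    have ha : 0 ≤ a := hL a (List.mem_cons_self ..)
    have hL' : ∀ a ∈ L, 0 ≤ a := fun x hx => hL x (List.mem_cons_of_mem _ hx)
    rw [List.foldl_cons]
    apply ih hL'
    intro k hk
    rw [PySem.List.pySetD_of_nonneg _ _ ha] at hk ⊢
    rw [List.length_set] at hk
    rw [pv_getD_set]
    by_cases h : k = a.toNat ∧ a.toNat < m.length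
    · rw [if_pos h]
      rw [pv_mark_row_length]
      have hcast : a = ((a.toNat : Nat) : Int) := by omega
      rw [hcast, PySem.List.pyGetD_natCast]
      exact hm a.toNat h.2
    · rw [if_neg h]
      exact hm k hk

theorem pv_rowfold_cell (size d : Int) (hd : 0 < d) (N : Nat) (L : List Int)
    (hL : ∀ a ∈ L, 0 ≤ a) :
    ∀ (m : List (List Bool)), (∀ k, k < m.length → (m.getD k []).length = N) →
      ∀ (i j : Nat), i < m.length → j < N →
      pvCell (L.foldl (fun m a =>
          PySem.List.pySetD m a (bps_mark_row (PySem.List.pyGetD m a []) size d)) m) i j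
        = (pvCell m i j || (decide ((i : Int) ∈ L)
            && decide ((j : Int) ∈ PySem.List.pyRange 0 size d))) := by
  induction L with
  | nil => intro m hm i j hi hj; simp [pvCell]
  | cons a L ih =>
    intro m hm i j hi hj
    have ha : 0 ≤ a := hL a (List.mem_cons_self ..)
    have hL' : ∀ a ∈ L, 0 ≤ a := fun x hx => hL x (List.mem_cons_of_mem _ hx)
    rw [List.foldl_cons]
    have hm' : ∀ k, k < (PySem.List.pySetD m a
        (bps_mark_row (PySem.List.pyGetD m a []) size d)).length →
        ((PySem.List.pySetD m a
          (bps_mark_row (PySem.List.pyGetD m a []) size d)).getD k []).length = N := by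
      intro k hk
      rw [PySem.List.pySetD_of_nonneg _ _ ha] at hk ⊢
      rw [List.length_set] at hk
      rw [pv_getD_set]
      by_cases h : k = a.toNat ∧ a.toNat < m.length
      · rw [if_pos h, pv_mark_row_length]
        have hcast : a = ((a.toNat : Nat) : Int) := by omega
        rw [hcast, PySem.List.pyGetD_natCast]
        exact hm a.toNat h.2
      · rw [if_neg h]; exact hm k hk
    have hi' : i < (PySem.List.pySetD m a
        (bps_mark_row (PySem.List.pyGetD m a []) size d)).length := by
      rw [PySem.List.length_pySetD]; exact hi
    rw [ih hL' _ hm' i j hi' hj]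
    have hcast : a = ((a.toNat : Nat) : Int) := by omega
    have hstep : pvCell (PySem.List.pySetD m a
        (bps_mark_row (PySem.List.pyGetD m a []) size d)) i j
        = (pvCell m i j || (decide ((i : Int) = a)
            && decide ((j : Int) ∈ PySem.List.pyRange 0 size d))) := by
      unfold pvCell
      rw [PySem.List.pySetD_of_nonneg _ _ ha, pv_getD_set]
      by_cases hia : i = a.toNat
      · have h : i = a.toNat ∧ a.toNat < m.length := ⟨hia, by omega⟩
        rw [if_pos h]
        rw [hcast, PySem.List.pyGetD_natCast]
        rw [pv_mark_row_getD _ _ _ hd j (by rw [hm a.toNat h.2]; exact hj)]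
        simp [hia]
      · have h : ¬ (i = a.toNat ∧ a.toNat < m.length) := by rintro ⟨h, -⟩; exact hia h
        rw [if_neg h]
        have : ¬ ((i : Int) = a) := by omega
        simp [this]
    rw [hstep]
    by_cases h1 : (i : Int) = a <;>
      by_cases h2 : (j : Int) ∈ PySem.List.pyRange 0 size d <;>
      by_cases h3 : (i : Int) ∈ L <;>
      simp [h1, h2, h3, List.mem_cons]

theorem pv_sieve_cell (size : Int) (N : Nat) (D : List Int) (hD : ∀ d ∈ D, 0 < d) :
    ∀ (m : List (List Bool)), (∀ k, k < m.length → (m.getD k []).length = N) →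
      ∀ (i j : Nat), i < m.length → j < N →
      pvCell (D.foldl (fun m d => bps_sieve_step m size d) m) i j
        = (pvCell m i j || decide (∃ d, d ∈ D ∧ (i : Int) ∈ PySem.List.pyRange 0 size d
            ∧ (j : Int) ∈ PySem.List.pyRange 0 size d)) := by
  induction D with
  | nil => intro m hm i j hi hj; simp
  | cons d D ih =>
    intro m hm i j hi hj
    have hd : 0 < d := hD d (List.mem_cons_self ..)
    have hD' : ∀ d ∈ D, 0 < d := fun x hx => hD x (List.mem_cons_of_mem _ hx)
    rw [List.foldl_cons]
    have hm' : ∀ k, k < (bps_sieve_step m size d).length →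
        ((bps_sieve_step m size d).getD k []).length = N := by
      unfold bps_sieve_step
      exact pv_rowfold_rows size d N _ (pv_range_nonneg hd) m hm
    have hi' : i < (bps_sieve_step m size d).length := by
      unfold bps_sieve_step; rw [pv_rowfold_length]; exact hi
    rw [ih hD' _ hm' i j hi' hj]
    have hstep : pvCell (bps_sieve_step m size d) i j
        = (pvCell m i j || (decide ((i : Int) ∈ PySem.List.pyRange 0 size d)
            && decide ((j : Int) ∈ PySem.List.pyRange 0 size d))) := by
      unfold bps_sieve_step
      exact pv_rowfold_cell size d hd N _ (pv_range_nonneg hd) m hm i j hi hj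
    rw [hstep]
    by_cases h1 : (i : Int) ∈ PySem.List.pyRange 0 size d <;>
      by_cases h2 : (j : Int) ∈ PySem.List.pyRange 0 size d <;>
      by_cases h3 : (∃ d, d ∈ D ∧ (i : Int) ∈ PySem.List.pyRange 0 size d
          ∧ (j : Int) ∈ PySem.List.pyRange 0 size d) <;>
      simp [h1, h2, h3]

-- arithmetic core: coprimality vs. existence of a common divisor 2 ≤ d < size
theorem pv_gcd_iff (size a b : Int) (ha : 0 ≤ a) (ha' : a < size) (hb : 0 ≤ b)
    (hb' : b < size) (hz : ¬ (a = 0 ∧ b = 0)) :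
    (Int.gcd a b = 1) ↔ ¬ ∃ d : Int, 2 ≤ d ∧ d < size ∧ d ∣ a ∧ d ∣ b := by
  constructor
  · rintro h ⟨d, hd2, -, hda, hdb⟩
    obtain ⟨c, rfl⟩ : ∃ c : Nat, d = (c : Int) := ⟨d.toNat, by omega⟩
    have hdg : c ∣ Int.gcd a b := Int.dvd_gcd hda hdb
    rw [h] at hdg
    have : c = 1 := Nat.dvd_one.mp hdg
    omega
  · intro h
    by_contra hg
    set g : Int := (Int.gcd a b : Int) with hgdef
    have hga : g ∣ a := Int.gcd_dvd_left a b
    have hgb : g ∣ b := Int.gcd_dvd_right a b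
    have hg0 : g ≠ 0 := by
      simp only [hgdef, ne_eq, Int.natCast_eq_zero, Int.gcd_eq_zero_iff]
      rintro ⟨h1, h2⟩
      exact hz ⟨by omega, by omega⟩
    have hg2 : 2 ≤ g := by
      have : (0:Int) ≤ g := Int.natCast_nonneg _
      have h1 : g ≠ 1 := fun h => hg (by rw [hgdef] at h; exact_mod_cast h)
      omega
    have hgs : g < size := by
      by_cases haz : a = 0
      · have hbz : b ≠ 0 := fun h => hz ⟨haz, h⟩
        have : g ≤ b := Int.le_of_dvd (by omega) hgb
        omega
      · have : g ≤ a := Int.le_of_dvd (by omega) hga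
        omega
    exact h ⟨g, hg2, hgs, hga, hgb⟩

theorem pv_is_primitive_pair (a b : Int) :
    is_primitive [a, b] = decide (Int.gcd a b = 1) := by
  simp only [is_primitive, List.foldl_cons, List.foldl_nil]
  have h1 : Int.gcd 0 |a| = a.natAbs := by
    simp [Int.gcd, Int.natAbs_abs]
  rw [h1]
  have h2 : Int.gcd (a.natAbs : Int) |b| = Int.gcd a b := by
    simp [Int.gcd, Int.natAbs_abs]
  rw [h2]
  by_cases h : Int.gcd a b = 1
  · simp [h]
  · simp [h]

-- the initial table is all-false with square shape
theorem pv_m0_rows (size : Int) :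
    ∀ k, k < ((PySem.List.pyRange 0 size 1).map
        (fun _ => List.replicate size.toNat false)).length →
      (((PySem.List.pyRange 0 size 1).map
        (fun _ => List.replicate size.toNat false)).getD k []).length = size.toNat := by
  intro k hk
  rw [List.length_map] at hk
  rw [List.getD_eq_getElem?_getD, List.getElem?_map, List.getElem?_eq_getElem hk]
  simp

theorem pv_m0_cell (size : Int) (i j : Nat)
    (hi : i < ((PySem.List.pyRange 0 size 1).map
        (fun _ => List.replicate size.toNat false)).length) :
    pvCell ((PySem.List.pyRange 0 size 1).map
        (fun _ => List.replicate size.toNat false)) i j = false := by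
  rw [List.length_map] at hi
  have hrow : ((PySem.List.pyRange 0 size 1).map
      (fun _ => List.replicate size.toNat false)).getD i [] = List.replicate size.toNat false := by
    rw [List.getD_eq_getElem?_getD, List.getElem?_map, List.getElem?_eq_getElem hi]
    rfl
  unfold pvCell
  rw [hrow]
  rw [List.getD_eq_getElem?_getD, List.getElem?_replicate]
  split <;> rfl

-- the finished sieve table: cell (i, j) is set iff i and j share a divisor 2 ≤ d < size
theorem pv_marked_cell (size : Int) (i j : Nat) (hi : i < size.toNat) (hj : j < size.toNat) :
    pvCell ((PySem.List.pyRange 2 size 1).foldl (fun m d => bps_sieve_step m size d)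
      ((PySem.List.pyRange 0 size 1).map (fun _ => List.replicate size.toNat false))) i j
    = true ↔ (∃ d : Int, 2 ≤ d ∧ d < size ∧ d ∣ (i : Int) ∧ d ∣ (j : Int)) := by
  have hm0len : ((PySem.List.pyRange 0 size 1).map
      (fun _ => List.replicate size.toNat false)).length = size.toNat := by
    rw [List.length_map, PySem.List.length_pyRange_one]
    omega
  have hD : ∀ d ∈ PySem.List.pyRange 2 size 1, 0 < d := by
    intro d hd
    rcases (PySem.List.mem_pyRange_one ..).1 hd with ⟨h2, -⟩
    omega
  rw [pv_sieve_cell size size.toNat _ hD _ (pv_m0_rows size) i j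
      (by rw [hm0len]; exact hi) hj]
  rw [pv_m0_cell size i j (by rw [List.length_map, PySem.List.length_pyRange_one]; omega)]
  rw [Bool.false_or, decide_eq_true_eq]
  constructor
  · rintro ⟨d, hdmem, hdi, hdj⟩
    rcases (PySem.List.mem_pyRange_one ..).1 hdmem with ⟨h2, hs⟩
    have hd0 : (0:Int) < d := by omega
    rcases (PySem.List.mem_pyRange_iff_of_pos hd0 _).1 hdi with ⟨-, -, hdvi⟩
    rcases (PySem.List.mem_pyRange_iff_of_pos hd0 _).1 hdj with ⟨-, -, hdvj⟩
    rw [sub_zero] at hdvi hdvj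
    exact ⟨d, h2, hs, hdvi, hdvj⟩
  · rintro ⟨d, h2, hs, hdi, hdj⟩
    have hd0 : (0:Int) < d := by omega
    refine ⟨d, (PySem.List.mem_pyRange_one ..).2 ⟨h2, hs⟩, ?_, ?_⟩
    · exact (PySem.List.mem_pyRange_iff_of_pos hd0 _).2 ⟨by omega, by omega, by rw [sub_zero]; exact hdi⟩
    · exact (PySem.List.mem_pyRange_iff_of_pos hd0 _).2 ⟨by omega, by omega, by rw [sub_zero]; exact hdj⟩

-- ===== VERDICT (by name: the statement is the Claim_ definition above) =====
theorem conifold_bps_spectrum_spec : Claim_equal_conifold_bps_spectrum := by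
  intro max_order _
  unfold Spec_conifold_bps_spectrum
  have halt : conifold_bps_spectrum_alt max_order =
      ((PySem.List.pyRange 0 (max_order + 1) 1).foldl (fun spectrum a =>
        (PySem.List.pyRange 0 (max_order + 1) 1).foldl (fun spectrum b =>
          if (¬ (a = 0 ∧ b = 0)) ∧ PySem.List.pyGetD (PySem.List.pyGetD
              ((PySem.List.pyRange 2 (max_order + 1) 1).foldl
                (fun m d => bps_sieve_step m (max_order + 1) d)
                ((PySem.List.pyRange 0 (max_order + 1) 1).map
                  (fun _ => List.replicate (max_order + 1).toNat false))) a []) b false = false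
          then spectrum.insert [a, b] 1 else spectrum) spectrum)
        (PySem.Dict.empty)).items := rfl
  rw [halt]
  unfold conifold_bps_spectrum
  congr 1
  apply PySem.List.foldl_congr_mem
  intro acc a hamem
  apply PySem.List.foldl_congr_mem
  intro acc2 b hbmem
  rcases (PySem.List.mem_pyRange_one ..).1 hamem with ⟨ha0, ha1⟩
  rcases (PySem.List.mem_pyRange_one ..).1 hbmem with ⟨hb0, hb1⟩
  have hBtest : PySem.List.pyGetD (PySem.List.pyGetD
      ((PySem.List.pyRange 2 (max_order + 1) 1).foldl
        (fun m d => bps_sieve_step m (max_order + 1) d)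
        ((PySem.List.pyRange 0 (max_order + 1) 1).map
          (fun _ => List.replicate (max_order + 1).toNat false))) a []) b false
      = true ↔ (∃ d : Int, 2 ≤ d ∧ d < max_order + 1 ∧ d ∣ a ∧ d ∣ b) := by
    rw [show a = ((a.toNat : Nat) : Int) from by omega,
        show b = ((b.toNat : Nat) : Int) from by omega,
        PySem.List.pyGetD_natCast, PySem.List.pyGetD_natCast]
    exact pv_marked_cell (max_order + 1) a.toNat b.toNat (by omega) (by omega)
  by_cases h0 : a = 0 ∧ b = 0
  · rw [if_pos h0, if_neg (by simp [h0])]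
  · rw [if_neg h0]
    by_cases hp : Int.gcd a b = 1
    · have hne := (pv_gcd_iff (max_order + 1) a b ha0 ha1 hb0 hb1 h0).1 hp
      have hflz : PySem.List.pyGetD (PySem.List.pyGetD
          ((PySem.List.pyRange 2 (max_order + 1) 1).foldl
            (fun m d => bps_sieve_step m (max_order + 1) d)
            ((PySem.List.pyRange 0 (max_order + 1) 1).map
              (fun _ => List.replicate (max_order + 1).toNat false))) a []) b false = false := by
        rw [Bool.eq_false_iff]
        intro ht
        exact hne (hBtest.1 ht)
      rw [if_pos (by rw [pv_is_primitive_pair]; exact decide_eq_true hp),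
          if_pos ⟨h0, hflz⟩]
    · have hex : ∃ d : Int, 2 ≤ d ∧ d < max_order + 1 ∧ d ∣ a ∧ d ∣ b := by
        by_contra hne
        exact hp ((pv_gcd_iff (max_order + 1) a b ha0 ha1 hb0 hb1 h0).2 hne)
      have htru := hBtest.2 hex
      rw [if_neg (by rw [pv_is_primitive_pair]; simp [hp]),
          if_neg (by rintro ⟨-, hc⟩; rw [htru] at hc; cases hc)]
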